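-- pv_equiv track=rewrite | github.com/Cong805/Spoof-IoT | Model Adversarial Sample/LGS_P.py | parse_rel_list
-- ===== SOURCE A (Python) =====
-- def parse_rel_list(rel_list):
--     device_type, brand, product = "", "", ""
--
--     for rel in rel_list:
--         if rel["predicate"] == "belong to":
--             product = rel["subject"]
--             device_type = rel["object"]
--         elif rel["predicate"] == "produce":
--             brand = rel["subject"]
--             product = rel["object"]
--         elif rel["predicate"] == "supply":
--             brand = rel["subject"]
--             device_type = rel["object"]
--     return [device_type, brand, product]
-- ===== SOURCE B (Python) =====
-- def parse_rel_list(rel_list):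
--     device_type, brand, product = "", "", ""
--     dt_set = b_set = p_set = False
--     for rel in reversed(rel_list):
--         pred = rel["predicate"]
--         if pred == "belong to":
--             if not p_set:
--                 product, p_set = rel["subject"], True
--             if not dt_set:
--                 device_type, dt_set = rel["object"], True
--         elif pred == "produce":
--             if not b_set:
--                 brand, b_set = rel["subject"], True
--             if not p_set:
--                 product, p_set = rel["object"], True
--         elif pred == "supply":
--             if not b_set:
--                 brand, b_set = rel["subject"], True
--             if not dt_set:
--                 device_type, dt_set = rel["object"], True
--         if dt_set and b_set and p_set:
--             break
--     return [device_type, brand, product]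
-- ===== Notes on version B (the rewrite author's own statement) =====
-- stated objective: alternative
-- what changed: B scans the list in reverse with three set-flags and stops as soon as all three fields are fixed (first match in reverse = A's last-match-wins forward overwrite), instead of A's forward pass that overwrites fields on every matching rel.
import Mathlib
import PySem

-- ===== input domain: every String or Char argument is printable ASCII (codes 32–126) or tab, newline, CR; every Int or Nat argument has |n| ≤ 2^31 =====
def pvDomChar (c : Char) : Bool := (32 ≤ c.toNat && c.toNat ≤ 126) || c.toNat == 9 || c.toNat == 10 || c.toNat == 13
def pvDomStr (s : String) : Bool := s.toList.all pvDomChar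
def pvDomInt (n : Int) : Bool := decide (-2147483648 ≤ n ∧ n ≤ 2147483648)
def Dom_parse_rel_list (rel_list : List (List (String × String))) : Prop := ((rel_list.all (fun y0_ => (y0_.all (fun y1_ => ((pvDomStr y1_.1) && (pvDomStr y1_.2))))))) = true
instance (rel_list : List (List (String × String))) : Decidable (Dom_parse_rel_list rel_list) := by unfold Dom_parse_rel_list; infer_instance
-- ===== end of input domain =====

-- B scans the relation list in reverse with three set-flags and an early exit; first match in
-- reverse order equals A's forward last-match-wins overwrite. Objective: alternative decomposition.


-- ===== PORT A =====
-- Python dict lookup rel[k] (first match; Pre_ keeps per-rel keys distinct, as in a real dict)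
def pvLook (rel : List (String × String)) (k : String) : Option String :=
  (PySem.Dict.mk rel).get? k

-- one iteration of A's forward loop; state = (device_type, brand, product).
-- 'none' branches (missing key ⇒ Python KeyError) are excluded by Pre_; the port skips there.
def pvStepA (st : String × String × String) (rel : List (String × String)) :
    String × String × String :=
  match pvLook rel "predicate" with
  | none => st
  | some pred =>
    if pred = "belong to" then
      (((pvLook rel "object").getD ""), st.2.1, ((pvLook rel "subject").getD ""))
    else if pred = "produce" then
      (st.1, ((pvLook rel "subject").getD ""), ((pvLook rel "object").getD ""))
    else if pred = "supply" then
      (((pvLook rel "object").getD ""), ((pvLook rel "subject").getD ""), st.2.2)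
    else st

def parse_rel_list (rel_list : List (List (String × String))) : List String :=
  match rel_list.foldl pvStepA ("", "", "") with
  | (device_type, brand, product) => [device_type, brand, product]

-- ===== PORT B =====
-- B's loop over reversed(rel_list): set each still-unset field at its first (reverse-order)
-- match, break when all three are set.  'none' predicate (excluded by Pre_) is a no-op.
def pvGoB (rels : List (List (String × String)))
    (d b p : String) (ds bs ps : Bool) : List String :=
  match rels with
  | [] => [d, b, p]
  | rel :: rest =>
    match pvLook rel "predicate" with
    | none => pvGoB rest d b p ds bs ps
    | some pred =>
      let (d', b', p', ds', bs', ps') :=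
        if pred = "belong to" then
          ((if ds then d else (pvLook rel "object").getD ""), b,
           (if ps then p else (pvLook rel "subject").getD ""), true, bs, true)
        else if pred = "produce" then
          (d, (if bs then b else (pvLook rel "subject").getD ""),
           (if ps then p else (pvLook rel "object").getD ""), ds, true, true)
        else if pred = "supply" then
          ((if ds then d else (pvLook rel "object").getD ""),
           (if bs then b else (pvLook rel "subject").getD ""), p, true, true, ps)
        else (d, b, p, ds, bs, ps)
      if ds' && bs' && ps' then [d', b', p'] else pvGoB rest d' b' p' ds' bs' ps'

def parse_rel_list_alt (rel_list : List (List (String × String))) : List String :=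
  pvGoB rel_list.reverse "" "" "" false false false

-- ===== PRECONDITION & SPEC =====
-- Pre_ excludes inputs where Python A raises KeyError (a rel without "predicate", or a rel whose
-- matching predicate lacks "subject"/"object"); it also keeps each rel's keys distinct, since
-- duplicate keys cannot occur in a real Python dict.
def Pre_parse_rel_list (rel_list : List (List (String × String))) : Prop :=
  ∀ rel ∈ rel_list, (rel.map Prod.fst).Nodup ∧ (pvLook rel "predicate").isSome ∧
    (pvLook rel "predicate" = some "belong to" ∨ pvLook rel "predicate" = some "produce" ∨
     pvLook rel "predicate" = some "supply" →
       (pvLook rel "subject").isSome ∧ (pvLook rel "object").isSome)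
instance (rel_list : List (List (String × String))) : Decidable (Pre_parse_rel_list rel_list) := by
  unfold Pre_parse_rel_list; infer_instance

def pvWitness_parse_rel_list : (List (List (String × String))) :=
  [[("predicate", "produce"), ("subject", "acme"), ("object", "cam")],
   [("predicate", "belong to"), ("subject", "cam"), ("object", "camera")]]

def Spec_parse_rel_list (rel_list : List (List (String × String))) (out : List String) : Prop := out = parse_rel_list_alt rel_list
instance (rel_list : List (List (String × String))) (out : List String) : Decidable (Spec_parse_rel_list rel_list out) := by unfold Spec_parse_rel_list; infer_instance

-- ===== CLAIM (what is proved, stated in full; the proofs are below) =====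
def Claim_equal_parse_rel_list : Prop := ∀ (rel_list : List (List (String × String))), Dom_parse_rel_list rel_list → Pre_parse_rel_list rel_list → Spec_parse_rel_list rel_list (parse_rel_list rel_list)

-- ===== LEMMAS AND PROOFS =====

-- Invariant of B's reverse loop: a set field keeps its value, an unset field ends up as the
-- corresponding component of A's forward fold over the reversed remainder.
theorem pvGoB_eq (rels : List (List (String × String))) (d b p : String) (ds bs ps : Bool)
    (hd : ds = false → d = "") (hb : bs = false → b = "") (hp : ps = false → p = "") :
    pvGoB rels d b p ds bs ps =
      [cond ds d (rels.reverse.foldl pvStepA ("", "", "")).1,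
       cond bs b (rels.reverse.foldl pvStepA ("", "", "")).2.1,
       cond ps p (rels.reverse.foldl pvStepA ("", "", "")).2.2] := by
  induction rels generalizing d b p ds bs ps with
  | nil => cases ds <;> cases bs <;> cases ps <;> simp_all [pvGoB]
  | cons rel rest ih =>
    rw [List.reverse_cons, List.foldl_append]
    simp only [List.foldl_cons, List.foldl_nil]
    unfold pvGoB
    cases hl : pvLook rel "predicate" with
    | none => rw [ih _ _ _ _ _ _ hd hb hp]; simp [pvStepA, hl]
    | some pred =>
      cases ds <;> cases bs <;> cases ps <;>
        simp only [forall_const, Bool.true_eq_false, false_implies] at hd hb hp <;>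
        (try subst hd) <;> (try subst hb) <;> (try subst hp) <;>
        by_cases h1 : pred = "belong to" <;> by_cases h2 : pred = "produce" <;>
          by_cases h3 : pred = "supply" <;>
            simp [pvStepA, hl, h1, h2, h3, ih]

-- ===== VERDICT (by name: the statement is the Claim_ definition above) =====
theorem parse_rel_list_spec : Claim_equal_parse_rel_list := by
  intro rel_list _ _
  unfold Spec_parse_rel_list parse_rel_list parse_rel_list_alt
  rw [pvGoB_eq _ _ _ _ _ _ _ (fun _ => rfl) (fun _ => rfl) (fun _ => rfl),
      List.reverse_reverse]
  rcases h : rel_list.foldl pvStepA ("", "", "") with ⟨d, b, p⟩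
  simp
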